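-- pv_equiv track=rewrite | github.com/shehryarkh4n/ebay-2025-german-NER | src/ebay_ner/postprocess.py | post_process_predictions
-- ===== SOURCE A (Python) =====
-- from typing import Dict, List, Tuple
--
-- def post_process_predictions(
--     records: List[Tuple[int, int, str, str]],
--     gazetteers: Dict[str, set],
--     allow: Dict[int, set],
-- ):
--     """
--     records: (Record Number, Category, Tag, Token)
--     """
--     corrected = []
--     known_brands = {"bmw", "audi", "vw", "mercedes", "opel", "ford"}
--     known_manufacturers = {"bosch", "ate", "brembo", "zimmermann", "febi"}
--     position_words = {
--         "va",
--         "ha",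
--         "vorne",
--         "hinten",
--         "links",
--         "rechts",
--         "vl",
--         "vr",
--         "hl",
--         "hr",
--     }
--
--     for rec, cat, tag, token in records:
--         token_lower = token.lower().strip()
--
--         # Gazetteer exclusivity
--         if tag != "O":
--             found_tags = [
--                 gaz_tag
--                 for gaz_tag, entities in gazetteers.items()
--                 if token_lower in entities and gaz_tag in allow[cat]
--             ]
--             if len(found_tags) == 1 and found_tags[0] != tag:
--                 tag = found_tags[0]
--
--         # Brand/manufacturer disambiguation
--         if token_lower in known_brands and tag == "Hersteller":
--             tag = "Kompatible_Fahrzeug_Marke"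
--         elif token_lower in known_manufacturers and tag == "Kompatible_Fahrzeug_Marke":
--             tag = "Hersteller"
--
--         # Position indicators
--         if token_lower in position_words and tag != "Einbauposition":
--             tag = "Einbauposition"
--
--         corrected.append((rec, cat, tag, token))
--
--     return corrected
-- ===== SOURCE B (Python) =====
-- from typing import Dict, List, Tuple
--
-- def post_process_predictions(
--     records: List[Tuple[int, int, str, str]],
--     gazetteers: Dict[str, set],
--     allow: Dict[int, set],
-- ):
--     """
--     records: (Record Number, Category, Tag, Token)
--
--     Same relabelling as the original, but the per-record scan over all
--     gazetteers is replaced by one up-front reverse index entity -> set of tags.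
--     """
--     index: Dict[str, set] = {}
--     for gaz_tag, entities in gazetteers.items():
--         for ent in entities:
--             index.setdefault(ent, set()).add(gaz_tag)
--
--     known_brands = {"bmw", "audi", "vw", "mercedes", "opel", "ford"}
--     known_manufacturers = {"bosch", "ate", "brembo", "zimmermann", "febi"}
--     position_words = {"va", "ha", "vorne", "hinten", "links", "rechts",
--                       "vl", "vr", "hl", "hr"}
--
--     out = []
--     for rec, cat, tag, token in records:
--         token_lower = token.lower().strip()
--
--         if tag != "O":
--             hits = index.get(token_lower)
--             if hits is not None:
--                 found = hits & allow[cat]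
--                 if len(found) == 1:
--                     (sole,) = found
--                     if sole != tag:
--                         tag = sole
--
--         # position words are disjoint from brands/manufacturers, so this single
--         # chain (position first) gives the same result as the original's two steps
--         if token_lower in position_words:
--             tag = "Einbauposition"
--         elif token_lower in known_brands and tag == "Hersteller":
--             tag = "Kompatible_Fahrzeug_Marke"
--         elif token_lower in known_manufacturers and tag == "Kompatible_Fahrzeug_Marke":
--             tag = "Hersteller"
--
--         out.append((rec, cat, tag, token))
--
--     return out
-- ===== Notes on version B (the rewrite author's own statement) =====
-- stated objective: faster
-- what changed: B builds a reverse index (entity -> set of gazetteer tags) once up front and relabels each record with a single O(1) dict lookup plus a set intersection against allow[cat], instead of A's per-record scan over all gazetteer items.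
-- outside the precondition, e.g. on post_process_predictions([(1, 2, 'X', 'bmw')], {'Y': {'bmw'}}, {}): A raises KeyError, B raises KeyError
import Mathlib
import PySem

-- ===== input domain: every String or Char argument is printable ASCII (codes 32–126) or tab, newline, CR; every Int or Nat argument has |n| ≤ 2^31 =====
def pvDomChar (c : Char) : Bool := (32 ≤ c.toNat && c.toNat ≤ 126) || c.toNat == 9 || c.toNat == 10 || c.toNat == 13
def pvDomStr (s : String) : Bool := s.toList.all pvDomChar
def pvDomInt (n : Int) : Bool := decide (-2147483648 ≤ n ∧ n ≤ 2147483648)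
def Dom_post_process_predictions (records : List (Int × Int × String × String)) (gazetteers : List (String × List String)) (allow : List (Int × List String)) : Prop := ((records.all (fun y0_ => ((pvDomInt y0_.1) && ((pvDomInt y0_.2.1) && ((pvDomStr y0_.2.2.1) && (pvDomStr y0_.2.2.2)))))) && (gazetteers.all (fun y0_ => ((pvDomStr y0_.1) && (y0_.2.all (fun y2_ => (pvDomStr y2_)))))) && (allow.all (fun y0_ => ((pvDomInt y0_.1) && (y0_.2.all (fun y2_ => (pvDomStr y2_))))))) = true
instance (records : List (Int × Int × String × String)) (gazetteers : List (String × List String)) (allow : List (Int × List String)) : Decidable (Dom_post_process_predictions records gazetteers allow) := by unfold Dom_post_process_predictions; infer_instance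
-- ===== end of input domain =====

-- B builds a reverse index entity → set of gazetteer tags once and then does a single pass
-- over the records with O(1) lookups, instead of scanning every gazetteer per record.


-- rule lists shared by both Pythons verbatim (literal sets of distinct strings)
def ppKnownBrands : List String := ["bmw", "audi", "vw", "mercedes", "opel", "ford"]
def ppKnownManufacturers : List String := ["bosch", "ate", "brembo", "zimmermann", "febi"]
def ppPositionWords : List String := ["va", "ha", "vorne", "hinten", "links", "rechts", "vl", "vr", "hl", "hr"]

-- ===== PORT A =====
-- gazetteer-exclusivity step of A: scan all gazetteer items for the token
def ppTag1A (gaz : PySem.Dict String (List String)) (alw : PySem.Dict Int (List String))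
    (cat : Int) (tag tl : String) : String :=
  if tag ≠ "O" then
    let found := (gaz.items.filter
        (fun p => p.2.contains tl && (alw.getD cat []).contains p.1)).map (fun p => p.1)
    if found.length = 1 ∧ PySem.List.pyGetD found 0 "" ≠ tag then PySem.List.pyGetD found 0 ""
    else tag
  else tag

-- loop body of A: per record, the gazetteer scan, then the brand/position rules
def ppStepA (gaz : PySem.Dict String (List String)) (alw : PySem.Dict Int (List String))
    (r : Int × Int × String × String) : Int × Int × String × String :=
  let tl := PySem.Str.strip (PySem.Str.lower r.2.2.2)
  let tag1 := ppTag1A gaz alw r.2.1 r.2.2.1 tl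
  let tag2 :=
    if ppKnownBrands.contains tl && (tag1 == "Hersteller") then "Kompatible_Fahrzeug_Marke"
    else if ppKnownManufacturers.contains tl && (tag1 == "Kompatible_Fahrzeug_Marke") then "Hersteller"
    else tag1
  let tag3 := if ppPositionWords.contains tl && !(tag2 == "Einbauposition") then "Einbauposition" else tag2
  (r.1, r.2.1, tag3, r.2.2.2)

def post_process_predictions (records : List (Int × Int × String × String)) (gazetteers : List (String × List String)) (allow : List (Int × List String)) : List (Int × Int × String × String) :=
  let gaz := PySem.Dict.ofList gazetteers
  let alw := PySem.Dict.ofList allow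
  records.foldl (fun corrected r => corrected ++ [ppStepA gaz alw r]) []

-- ===== PORT B =====
-- reverse index: for each (gaz_tag, entities), index.setdefault(ent, set()).add(gaz_tag)
def ppIndex (gaz : PySem.Dict String (List String)) : PySem.Dict String (PySem.Set String) :=
  gaz.items.foldl
    (fun idx p => p.2.foldl (fun idx e => idx.modify e [] (fun s => PySem.Set.add s p.1)) idx)
    PySem.Dict.empty

-- gazetteer-exclusivity step of B: one index lookup and a set intersection
def ppTag1B (idx : PySem.Dict String (PySem.Set String)) (alw : PySem.Dict Int (List String))
    (cat : Int) (tag tl : String) : String :=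
  if tag ≠ "O" then
    match idx.get? tl with
    | none => tag
    | some hits =>
      match PySem.Set.inter hits (alw.getD cat []) with
      | [sole] => if sole ≠ tag then sole else tag
      | _ => tag
  else tag

-- loop body of B: indexed lookup, then the same brand/position rules
def ppStepB (idx : PySem.Dict String (PySem.Set String)) (alw : PySem.Dict Int (List String))
    (r : Int × Int × String × String) : Int × Int × String × String :=
  let tl := PySem.Str.strip (PySem.Str.lower r.2.2.2)
  let tag1 := ppTag1B idx alw r.2.1 r.2.2.1 tl
  let tag2 :=
    if ppPositionWords.contains tl then "Einbauposition"
    else if ppKnownBrands.contains tl && (tag1 == "Hersteller") then "Kompatible_Fahrzeug_Marke"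
    else if ppKnownManufacturers.contains tl && (tag1 == "Kompatible_Fahrzeug_Marke") then "Hersteller"
    else tag1
  (r.1, r.2.1, tag2, r.2.2.2)

def post_process_predictions_alt (records : List (Int × Int × String × String)) (gazetteers : List (String × List String)) (allow : List (Int × List String)) : List (Int × Int × String × String) :=
  let alw := PySem.Dict.ofList allow
  let idx := ppIndex (PySem.Dict.ofList gazetteers)
  records.map (ppStepB idx alw)

-- ===== PRECONDITION & SPEC =====
-- Pre_ excludes exactly the inputs on which A raises KeyError: a record whose tag ≠ "O" and whose
-- (lowered, stripped) token occurs in some gazetteer entity set while its category is not a key of allow.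
def Pre_post_process_predictions (records : List (Int × Int × String × String)) (gazetteers : List (String × List String)) (allow : List (Int × List String)) : Prop :=
  ∀ r ∈ records, r.2.2.1 ≠ "O" →
    ((PySem.Dict.ofList gazetteers).items.any
        (fun p => p.2.contains (PySem.Str.strip (PySem.Str.lower r.2.2.2)))) = true →
    ((PySem.Dict.ofList allow).contains r.2.1) = true
instance (records : List (Int × Int × String × String)) (gazetteers : List (String × List String)) (allow : List (Int × List String)) : Decidable (Pre_post_process_predictions records gazetteers allow) := by unfold Pre_post_process_predictions; infer_instance

def pvWitness_post_process_predictions : (List (Int × Int × String × String)) × (List (String × List String)) × (List (Int × List String)) :=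
  ([(1, 2, "Hersteller", " BMW "), (3, 2, "O", "va")], [("Kompatible_Fahrzeug_Marke", ["bmw", "audi"])], [(2, ["Kompatible_Fahrzeug_Marke", "Hersteller"])])

def Spec_post_process_predictions (records : List (Int × Int × String × String)) (gazetteers : List (String × List String)) (allow : List (Int × List String)) (out : List (Int × Int × String × String)) : Prop := out = post_process_predictions_alt records gazetteers allow
instance (records : List (Int × Int × String × String)) (gazetteers : List (String × List String)) (allow : List (Int × List String)) (out : List (Int × Int × String × String)) : Decidable (Spec_post_process_predictions records gazetteers allow out) := by unfold Spec_post_process_predictions; infer_instance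

-- ===== CLAIM (what is proved, stated in full; the proofs are below) =====
def Claim_equal_post_process_predictions : Prop := ∀ (records : List (Int × Int × String × String)) (gazetteers : List (String × List String)) (allow : List (Int × List String)), Dom_post_process_predictions records gazetteers allow → Pre_post_process_predictions records gazetteers allow → Spec_post_process_predictions records gazetteers allow (post_process_predictions records gazetteers allow)

-- ===== LEMMAS AND PROOFS =====

-- effect of one gazetteer entry's inner loop on the index, at any key e
lemma ppIndex_inner (g : String) (ents : List String) (d : PySem.Dict String (PySem.Set String)) (e : String) :
    (ents.foldl (fun idx x => idx.modify x [] (fun s => PySem.Set.add s g)) d).getD e [] =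
      if e ∈ ents then PySem.Set.add (d.getD e []) g else d.getD e [] := by
  induction ents generalizing d with
  | nil => simp
  | cons x rest ih =>
    simp only [List.foldl_cons]
    rw [ih, PySem.Dict.getD_modify]
    by_cases hex : e = x
    · subst hex
      by_cases hr : e ∈ rest
      · simp only [hr, if_pos, List.mem_cons, true_or]
        rw [PySem.Set.add_of_mem (by simp [pysem])]
      · simp [hr]
    · simp [hex]

-- the index at key e lists exactly the gazetteer tags whose entity set contains e, in items order
lemma ppIndex_outer (l : List (String × List String)) (d : PySem.Dict String (PySem.Set String)) (e : String)
    (hnd : (l.map (fun p => p.1)).Nodup) (hdisj : ∀ p ∈ l, p.1 ∉ d.getD e []) :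
    (l.foldl (fun idx p => p.2.foldl (fun idx x => idx.modify x [] (fun s => PySem.Set.add s p.1)) idx) d).getD e [] =
      d.getD e [] ++ (l.filter (fun p => p.2.contains e)).map (fun p => p.1) := by
  induction l generalizing d with
  | nil => simp
  | cons q rest ih =>
    have hnd' := hnd
    rw [List.map_cons, List.nodup_cons] at hnd'
    simp only [List.foldl_cons]
    have hd' : (q.2.foldl (fun idx x => idx.modify x [] (fun s => PySem.Set.add s q.1)) d).getD e [] =
        if e ∈ q.2 then d.getD e [] ++ [q.1] else d.getD e [] := by
      rw [ppIndex_inner]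
      by_cases h : e ∈ q.2
      · rw [if_pos h, if_pos h, PySem.Set.add_of_not_mem (hdisj q (by simp))]
      · rw [if_neg h, if_neg h]
    have hdisj' : ∀ p ∈ rest, p.1 ∉ (q.2.foldl (fun idx x => idx.modify x [] (fun s => PySem.Set.add s q.1)) d).getD e [] := by
      intro p hp
      rw [hd']
      have h1 : p.1 ∉ d.getD e [] := hdisj p (List.mem_cons_of_mem _ hp)
      have h2 : p.1 ≠ q.1 := by
        intro hpq
        exact hnd'.1 (hpq ▸ List.mem_map_of_mem hp)
      by_cases h : e ∈ q.2
      · rw [if_pos h]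
        intro hmem
        rcases List.mem_append.mp hmem with hm | hm
        · exact h1 hm
        · exact h2 (by simpa using hm)
      · rw [if_neg h]; exact h1
    rw [ih _ hnd'.2 hdisj', hd', List.filter_cons]
    by_cases h : e ∈ q.2
    · simp [h]
    · simp [h]

-- the reverse index characterised: its entry at e is A's list of matching gazetteer tags
lemma ppIndex_getD (gaz : PySem.Dict String (List String)) (e : String) (hnd : gaz.keys.Nodup) :
    (ppIndex gaz).getD e [] = (gaz.items.filter (fun p => p.2.contains e)).map (fun p => p.1) := by
  unfold ppIndex
  rw [ppIndex_outer gaz.items PySem.Dict.empty e hnd (by simp [PySem.Dict.getD_empty])]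
  simp [PySem.Dict.getD_empty]

-- the indexed lookup of B computes exactly A's gazetteer scan
lemma ppTag1_eq (gazetteers : List (String × List String)) (alw : PySem.Dict Int (List String))
    (cat : Int) (tag tl : String) :
    ppTag1A (PySem.Dict.ofList gazetteers) alw cat tag tl =
      ppTag1B (ppIndex (PySem.Dict.ofList gazetteers)) alw cat tag tl := by
  unfold ppTag1A ppTag1B
  set gaz := PySem.Dict.ofList gazetteers with hgaz
  set allowed := alw.getD cat [] with hallowed
  have hidx := ppIndex_getD gaz tl (PySem.Dict.nodup_keys_ofList gazetteers)
  by_cases htag : tag ≠ "O"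
  · rw [if_pos htag, if_pos htag]
    cases hhits : (ppIndex gaz).get? tl with
    | none =>
      have hnil : ([] : List String) = (gaz.items.filter (fun p => p.2.contains tl)).map (fun p => p.1) := by
        rw [← hidx, PySem.Dict.getD_eq_get?_getD, hhits]; rfl
      have h0 : ∀ p ∈ gaz.items, (p.2.contains tl) = false := by
        intro p hp
        have hm := List.filter_eq_nil_iff.mp (List.map_eq_nil_iff.mp hnil.symm) p hp
        simpa using hm
      have hempty : gaz.items.filter (fun p => p.2.contains tl && allowed.contains p.1) = [] := by
        rw [List.filter_eq_nil_iff]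
        intro p hp
        simp only [h0 p hp, Bool.false_and]
        simp
      simp only [hempty, List.map_nil]
      simp
    | some hits =>
      have hfull : (ppIndex gaz).getD tl [] = hits := by
        rw [PySem.Dict.getD_eq_get?_getD, hhits]; rfl
      have hfound : PySem.Set.inter hits allowed =
          (gaz.items.filter (fun p => p.2.contains tl && allowed.contains p.1)).map (fun p => p.1) := by
        show List.filter (fun x => allowed.contains x) hits = _
        rw [← hfull, hidx, List.filter_map, List.filter_filter]
        congr 1
        apply List.filter_congr
        intro p _
        simp [Function.comp, Bool.and_comm]
      simp only [hfound]
      cases hL : (gaz.items.filter (fun p => p.2.contains tl && allowed.contains p.1)).map (fun p => p.1) with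
      | nil => simp
      | cons a L' =>
        cases L' with
        | nil =>
          by_cases hat : a = tag
          · subst hat; simp [pysem]
          · simp [pysem, hat]
        | cons b L'' => simp
  · rw [if_neg htag, if_neg htag]

-- position words never occur among the brand/manufacturer words
lemma pp_pos_not_brand (tl : String) (h : tl ∈ ppPositionWords) : tl ∉ ppKnownBrands := by
  fin_cases h <;> decide

lemma pp_pos_not_manu (tl : String) (h : tl ∈ ppPositionWords) : tl ∉ ppKnownManufacturers := by
  fin_cases h <;> decide

-- A's rule order (brand swap, then position) equals B's single chain (position first)
lemma ppRules_eq (tl t : String) :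
    (let tag2 := if ppKnownBrands.contains tl && (t == "Hersteller") then "Kompatible_Fahrzeug_Marke"
                 else if ppKnownManufacturers.contains tl && (t == "Kompatible_Fahrzeug_Marke") then "Hersteller"
                 else t
     if ppPositionWords.contains tl && !(tag2 == "Einbauposition") then "Einbauposition" else tag2) =
    (if ppPositionWords.contains tl then "Einbauposition"
     else if ppKnownBrands.contains tl && (t == "Hersteller") then "Kompatible_Fahrzeug_Marke"
     else if ppKnownManufacturers.contains tl && (t == "Kompatible_Fahrzeug_Marke") then "Hersteller"
     else t) := by
  by_cases hpm : tl ∈ ppPositionWords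
  · have hb := pp_pos_not_brand tl hpm
    have hm := pp_pos_not_manu tl hpm
    by_cases ht : t = "Einbauposition" <;> simp [hpm, hb, hm, ht]
  · simp [hpm]

-- per record, the two loop bodies agree
lemma ppStep_eq (gazetteers : List (String × List String)) (alw : PySem.Dict Int (List String))
    (r : Int × Int × String × String) :
    ppStepA (PySem.Dict.ofList gazetteers) alw r = ppStepB (ppIndex (PySem.Dict.ofList gazetteers)) alw r := by
  unfold ppStepA ppStepB
  simp only [ppTag1_eq]
  exact congrArg (fun z => (r.1, r.2.1, z, r.2.2.2)) (ppRules_eq _ _)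

-- ===== VERDICT (by name: the statement is the Claim_ definition above) =====
theorem post_process_predictions_spec : Claim_equal_post_process_predictions := by
  intro records gazetteers allow _ _
  unfold Spec_post_process_predictions post_process_predictions post_process_predictions_alt
  rw [PySem.List.foldl_append_singleton_eq_map]
  simp only [List.nil_append]
  exact List.map_congr_left (fun r _ => ppStep_eq gazetteers (PySem.Dict.ofList allow) r)
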